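-- pv_equiv track=rewrite | github.com/dhruv-gautam16/Code_Chef-Contest- | SUNDAY.py | count_holidays
-- ===== SOURCE A (Python) =====
-- def count_holidays(n, festivals):
--     holidays = set()  # set to store all holidays
--     for i in range(1, 31):
--         if i % 7 == 6 or i % 7 == 0:  # check if day is a Saturday or Sunday
--             holidays.add(i)
--     for festival in festivals:
--         if festival % 7 != 0 and festival % 7 != 6:  # check if festival is not on a weekend
--             holidays.add(festival)
--     return len(holidays)
-- ===== SOURCE B (Python) =====
-- def count_holidays(n, festivals):
--     # A 30-day month always has exactly 8 weekend days (6,7,13,14,20,21,27,28),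
--     # and a non-weekend festival can never coincide with one of them, so the two
--     # groups are disjoint.  Dedup the festivals WITHOUT a set: sort them so equal
--     # values are adjacent and count each weekday value once, at its first slot.
--     total = 8
--     prev = None
--     for f in sorted(festivals):
--         if f != prev and f % 7 != 0 and f % 7 != 6:
--             total += 1
--         prev = f
--     return total
-- ===== Notes on version B (the rewrite author's own statement) =====
-- stated objective: alternative
-- what changed: Replaces A's hash-set construction (30-day loop plus set of weekday festivals) by the closed-form 8 weekend days plus a sort-then-scan that counts distinct weekday festivals via adjacent-duplicate skipping, using no set at all.
import Mathlib
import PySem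

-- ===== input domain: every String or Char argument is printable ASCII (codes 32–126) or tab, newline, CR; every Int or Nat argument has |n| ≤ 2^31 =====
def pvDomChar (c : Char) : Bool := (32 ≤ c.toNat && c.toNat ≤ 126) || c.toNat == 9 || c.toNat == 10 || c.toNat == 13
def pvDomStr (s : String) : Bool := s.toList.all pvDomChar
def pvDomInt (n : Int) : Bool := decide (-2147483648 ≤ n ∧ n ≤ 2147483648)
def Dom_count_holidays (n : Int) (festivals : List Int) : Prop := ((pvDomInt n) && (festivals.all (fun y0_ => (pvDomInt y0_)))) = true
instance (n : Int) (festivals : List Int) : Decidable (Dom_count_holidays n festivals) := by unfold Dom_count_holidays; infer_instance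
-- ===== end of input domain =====

-- B replaces A's set-building loops by the constant 8 weekend days plus a
-- sort-then-scan that counts distinct weekday festivals (no set): alternative.


-- ===== PORT A =====
def count_holidays (n : Int) (festivals : List Int) : Int :=
  let holidays : PySem.Set Int := PySem.Set.empty
  let holidays := (PySem.List.pyRange 1 31 1).foldl
    (fun s i => if PySem.Int.mod i 7 == 6 || PySem.Int.mod i 7 == 0 then PySem.Set.add s i else s)
    holidays
  let holidays := festivals.foldl
    (fun s f => if !(PySem.Int.mod f 7 == 0) && !(PySem.Int.mod f 7 == 6) then PySem.Set.add s f else s)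
    holidays
  (PySem.Set.len holidays : Int)

-- ===== PORT B =====
-- B's loop body: state = (total, prev); prev is None before the first iteration
def count_holidays_alt (n : Int) (festivals : List Int) : Int :=
  let r := (PySem.List.sorted festivals (fun x => x) false).foldl
    (fun (st : Int × Option Int) f =>
      (if (some f != st.2) && !(PySem.Int.mod f 7 == 0) && !(PySem.Int.mod f 7 == 6)
       then st.1 + 1 else st.1, some f))
    ((8 : Int), (none : Option Int))
  r.1

-- ===== PRECONDITION & SPEC =====
def Spec_count_holidays (n : Int) (festivals : List Int) (out : Int) : Prop := out = count_holidays_alt n festivals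
instance (n : Int) (festivals : List Int) (out : Int) : Decidable (Spec_count_holidays n festivals out) := by unfold Spec_count_holidays; infer_instance

-- ===== CLAIM (what is proved, stated in full; the proofs are below) =====
def Claim_equal_count_holidays : Prop := ∀ (n : Int) (festivals : List Int), Dom_count_holidays n festivals → Spec_count_holidays n festivals (count_holidays n festivals)

-- ===== LEMMAS AND PROOFS =====

-- the weekday predicate shared by A's second loop and B's scan
def pvWk (f : Int) : Bool := !(PySem.Int.mod f 7 == 0) && !(PySem.Int.mod f 7 == 6)

-- A's first loop evaluates to the fixed 8 weekend days
theorem pv_first_loop :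
    (PySem.List.pyRange 1 31 1).foldl
      (fun s i => if PySem.Int.mod i 7 == 6 || PySem.Int.mod i 7 == 0 then PySem.Set.add s i else s)
      (PySem.Set.empty : PySem.Set Int)
    = [6, 7, 13, 14, 20, 21, 27, 28] := by decide

-- the add-if loop is Set.update with the filtered list
theorem pv_foldl_addif (l : List Int) (s : PySem.Set Int) :
    l.foldl (fun s f => if pvWk f then PySem.Set.add s f else s) s
    = PySem.Set.update s (l.filter pvWk) := by
  induction l generalizing s with
  | nil => simp [PySem.Set.update]
  | cons x xs ih =>
    simp only [List.foldl_cons, List.filter_cons]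
    by_cases h : pvWk x
    · simp [h, ih, PySem.Set.update_cons]
    · simp [h, ih]

-- a weekend-day member never satisfies the filter
theorem pv_not_in_W (y : Int) (hy : pvWk y = true) :
    y ∉ ([6, 7, 13, 14, 20, 21, 27, 28] : List Int) := by
  intro hmem
  fin_cases hmem <;> simp [pvWk, PySem.Int.mod] at hy

-- a nodup list has the length of its element finset
theorem pv_ofList_len (u : List Int) :
    (PySem.Set.ofList u).length = u.toFinset.card := by
  have hnd : (PySem.Set.ofList u).Nodup := PySem.Set.nodup_ofList u
  have hfs : (PySem.Set.ofList u).toFinset = u.toFinset := by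
    apply Finset.ext
    intro a
    simp [List.mem_toFinset, PySem.Set.mem_ofList]
  rw [← List.toFinset_card_of_nodup hnd, hfs]

-- B's scan step
def pvStep (st : Int × Option Int) (f : Int) : Int × Option Int :=
  (if (some f != st.2) && !(PySem.Int.mod f 7 == 0) && !(PySem.Int.mod f 7 == 6)
   then st.1 + 1 else st.1, some f)

-- fold the weekday predicate and reassociate the scan condition
theorem pvStep_eq (st : Int × Option Int) (f : Int) :
    pvStep st f = (if (some f != st.2) && pvWk f then st.1 + 1 else st.1, some f) := by
  simp [pvStep, pvWk, Bool.and_assoc]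

-- loop invariant: over a sorted tail whose elements dominate prev, the scan
-- adds the number of distinct weekday values not already seen as prev
theorem pv_scan (l : List Int) (t : Int) (p : Option Int)
    (hs : l.Pairwise (· ≤ ·))
    (hp : ∀ y ∈ l, ∀ q, p = some q → q ≤ y) :
    (l.foldl pvStep (t, p)).1
    = t + (((l.filter pvWk).toFinset \ p.toList.toFinset).card : Int) := by
  induction l generalizing t p with
  | nil => simp
  | cons x xs ih =>
    have hx : ∀ y ∈ xs, x ≤ y := fun y hy => (List.pairwise_cons.mp hs).1 y hy
    have hs' : xs.Pairwise (· ≤ ·) := (List.pairwise_cons.mp hs).2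
    have hp' : ∀ y ∈ xs, ∀ q, (some x : Option Int) = some q → q ≤ y := by
      intro y hy q hq; cases hq; exact hx y hy
    simp only [List.foldl_cons]
    have hrec := ih (if (some x != p) && pvWk x then t + 1 else t) (some x) hs' hp'
    rw [pvStep_eq, hrec]
    by_cases hpx : p = some x
    · subst hpx
      by_cases hw : pvWk x
      · simp only [bne_self_eq_false, Bool.false_and, if_neg Bool.false_ne_true]
        have : ((x :: xs).filter pvWk).toFinset \ ({x} : Finset Int)
            = (xs.filter pvWk).toFinset \ ({x} : Finset Int) := by
          apply Finset.ext; intro a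
          simp only [List.filter_cons, hw, if_pos, List.toFinset_cons,
            Finset.mem_sdiff, Finset.mem_insert, Finset.mem_singleton]
          tauto
        rw [show ((some x : Option Int).toList.toFinset) = ({x} : Finset Int) by simp,
          this]
      · have hxs : ((x :: xs).filter pvWk) = xs.filter pvWk := by
          simp [hw]
        simp only [bne_self_eq_false, Bool.false_and, if_neg Bool.false_ne_true, hxs]
    · -- p, if some q, satisfies q < x, hence is not among x :: xs at all
      have hpnot : ∀ q, p = some q → q ∉ ((x :: xs).filter pvWk).toFinset := by
        intro q hq hmem
        have hqy : q ∈ x :: xs := List.mem_of_mem_filter (List.mem_toFinset.mp hmem)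
        have hle : q ≤ x := hp x List.mem_cons_self q hq
        have hge : x ≤ q := by
          rcases List.mem_cons.mp hqy with h | h
          · exact le_of_eq h.symm
          · exact hx q h
        exact hpx (by rw [hq, le_antisymm hle hge])
      have hsd : ((x :: xs).filter pvWk).toFinset \ p.toList.toFinset
          = ((x :: xs).filter pvWk).toFinset := by
        apply Finset.sdiff_eq_self_of_disjoint
        apply Finset.disjoint_right.mpr
        intro a ha
        cases p with
        | none => simp at ha
        | some q =>
          have haq : a = q := by simpa using ha
          subst haq
          exact hpnot a rfl
      rw [hsd]
      have hbne : (some x != p) = true := by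
        cases p with
        | none => rfl
        | some q => simp; intro h; exact hpx (by rw [h])
      by_cases hw : pvWk x
      · simp only [hbne, hw, Bool.and_true, if_pos]
        have hins : ((x :: xs).filter pvWk).toFinset
            = insert x (xs.filter pvWk).toFinset := by
          simp [hw]
        have hx_notmem : x ∉ (xs.filter pvWk).toFinset \ ({x} : Finset Int) := by simp
        have hswap : insert x (xs.filter pvWk).toFinset
            = insert x ((xs.filter pvWk).toFinset \ ({x} : Finset Int)) := by
          apply Finset.ext; intro a
          simp only [Finset.mem_insert, Finset.mem_sdiff, Finset.mem_singleton]
          tauto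
        rw [hins, hswap, Finset.card_insert_of_notMem hx_notmem]
        simp only [Option.toList, List.toFinset_cons, List.toFinset_nil, insert_empty_eq]
        push_cast
        ring
      · have hxs : ((x :: xs).filter pvWk) = xs.filter pvWk := by
          simp [hw]
        have hxno : x ∉ (xs.filter pvWk).toFinset := by
          simp only [List.mem_toFinset, List.mem_filter]
          rintro ⟨-, hwk⟩; exact hw hwk
        have hnx : (xs.filter pvWk).toFinset \ ({x} : Finset Int)
            = (xs.filter pvWk).toFinset := by
          apply Finset.sdiff_eq_self_of_disjoint
          rw [Finset.disjoint_singleton_right]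
          exact hxno
        simp only [hw, Bool.and_false, Bool.false_and, if_neg Bool.false_ne_true,
          hxs, Option.toList, List.toFinset_cons, List.toFinset_nil, insert_empty_eq, hnx]

-- ===== VERDICT (by name: the statement is the Claim_ definition above) =====
theorem count_holidays_spec : Claim_equal_count_holidays := by
  intro n festivals _
  unfold Spec_count_holidays count_holidays count_holidays_alt
  simp only []
  rw [pv_first_loop]
  -- fold the named helpers back into both sides
  rw [show (fun (s : PySem.Set Int) (f : Int) =>
        if !(PySem.Int.mod f 7 == 0) && !(PySem.Int.mod f 7 == 6)
        then PySem.Set.add s f else s)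
      = (fun s f => if pvWk f then PySem.Set.add s f else s) from rfl]
  rw [show (fun (st : Int × Option Int) (f : Int) =>
        (if (some f != st.2) && !(PySem.Int.mod f 7 == 0) && !(PySem.Int.mod f 7 == 6)
         then st.1 + 1 else st.1, some f)) = pvStep from rfl]
  -- A's side: 8 weekend days plus the distinct weekday festivals
  rw [pv_foldl_addif festivals ([6, 7, 13, 14, 20, 21, 27, 28] : PySem.Set Int),
    PySem.Set.update_eq_append_filter]
  have hfilt : (PySem.Set.ofList (festivals.filter pvWk)).filter
      (fun y => !(PySem.Set.contains ([6, 7, 13, 14, 20, 21, 27, 28] : PySem.Set Int) y))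
      = PySem.Set.ofList (festivals.filter pvWk) := by
    apply List.filter_eq_self.mpr
    intro y hy
    have hy' : y ∈ festivals.filter pvWk := (PySem.Set.mem_ofList _ _).mp hy
    have h8 := pv_not_in_W y (List.mem_filter.mp hy').2
    simp at h8 ⊢
    exact h8
  rw [hfilt]
  -- B's side: the sorted scan counts the same distinct weekday values
  have hscan := pv_scan (PySem.List.sorted festivals (fun x => x) false) 8 none
    (PySem.List.sorted_pairwise (xs := festivals) (key := fun x => x))
    (by intro y _ q hq; cases hq)
  rw [hscan]
  have hperm : (PySem.List.sorted festivals (fun x => x) false).Perm festivals :=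
    PySem.List.sorted_perm ..
  have hpf : ((PySem.List.sorted festivals (fun x => x) false).filter pvWk).toFinset
      = (festivals.filter pvWk).toFinset :=
    Finset.ext fun a => by simp [List.mem_toFinset]
  simp only [Option.toList, List.toFinset_nil, Finset.sdiff_empty, hpf,
    PySem.Set.len, List.length_append, List.length_cons, List.length_nil,
    pv_ofList_len]
  push_cast
  ring
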